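-- pv_equiv track=rewrite | github.com/irudeva/MeridTransport | scripts/objFlux.py | locate_regions
-- ===== SOURCE A (Python) =====
-- from collections import namedtuple
-- import functools
--
-- Point = namedtuple('Point', 'x y')
--
-- def points_adjoin(p1, p2):
--     # to accept diagonal adjacency, use this form
--     #return -1 <= p1.x-p2.x <= 1 and -1 <= p1.y-p2.y <= 1
--     return (-1 <= p1.x-p2.x <= 1 and p1.y == p2.y or
--              p1.x == p2.x and -1 <= p1.y-p2.y <= 1)
--
-- def adjoins(pts, pt):
--     return any(points_adjoin(p,pt) for p in pts)
--
-- def locate_regions(datastring,critvar):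
--     # data = map(list, datastring.splitlines())
--     data = datastring
--     regions = []
--     datapts = [Point(x,y)
--                 for y,row in enumerate(data)
--                     for x,value in enumerate(row) if value<=critvar]
--     for dp in datapts:
--         # find all adjoining regions
--         adjregs = [r for r in regions if adjoins(r,dp)]
--         if adjregs:
--             adjregs[0].add(dp)
--             if len(adjregs) > 1:
--                 # joining more than one reg, merge
--                 regions[:] = [r for r in regions if r not in adjregs]
--                 regions.append(functools.reduce(set.union, adjregs))
--         else:
--             # not adjoining any, start a new region
--             regions.append(set([dp]))
--     return regions
-- ===== SOURCE B (Python) =====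
-- def locate_regions(datastring, critvar):
--     # One pass over the grid: an owner dict maps each kept cell to its region id,
--     # so each new cell consults only its left and up neighbors instead of scanning
--     # every region; merged regions get a fresh id appended at the end, matching A's
--     # region order.
--     regions = {}   # id -> set of points, in creation order
--     owner = {}     # point -> current region id
--     nid = 0
--     for y, row in enumerate(datastring):
--         for x, value in enumerate(row):
--             if value <= critvar:
--                 dp = (x, y)
--                 a = owner.get((x - 1, y))
--                 b = owner.get((x, y - 1))
--                 if a is None and b is None:
--                     regions[nid] = {dp}
--                     owner[dp] = nid
--                     nid += 1
--                 elif a is None or b is None or a == b: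
--                     i = a if a is not None else b
--                     regions[i].add(dp)
--                     owner[dp] = i
--                 else:
--                     lo, hi = (a, b) if a < b else (b, a)
--                     merged = (regions.pop(lo) | {dp}) | regions.pop(hi)
--                     regions[nid] = merged
--                     for p in merged:
--                         owner[p] = nid
--                     nid += 1
--     return list(regions.values())
-- ===== Notes on version B (the rewrite author's own statement) =====
-- stated objective: faster
-- what changed: B replaces A's per-cell scan over every region (testing adjacency against every stored point) with a single pass that looks up only the left and up neighbors in an owner dictionary, merging the at most two adjoining regions under a fresh id appended at the end.
import Mathlib
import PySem

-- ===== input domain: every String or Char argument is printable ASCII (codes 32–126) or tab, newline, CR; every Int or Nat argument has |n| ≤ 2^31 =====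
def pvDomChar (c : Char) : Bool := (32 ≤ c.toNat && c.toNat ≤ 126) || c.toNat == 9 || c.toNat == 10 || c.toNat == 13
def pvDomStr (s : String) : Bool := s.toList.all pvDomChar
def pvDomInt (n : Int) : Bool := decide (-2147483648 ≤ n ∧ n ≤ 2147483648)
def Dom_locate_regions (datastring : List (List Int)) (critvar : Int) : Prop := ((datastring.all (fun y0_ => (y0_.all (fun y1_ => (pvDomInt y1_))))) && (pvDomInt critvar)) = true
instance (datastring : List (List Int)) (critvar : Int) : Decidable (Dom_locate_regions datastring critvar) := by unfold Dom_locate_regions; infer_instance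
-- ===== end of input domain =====

-- B replaces A's per-cell scan of every region (and every point in it) with an
-- owner dictionary consulted only at the left and up neighbors; same return value.

-- ===== PORT A =====
-- points_adjoin(p1, p2)  (Python's chained -1 <= d <= 1 and the and/or precedence kept)
def pvAdj (p q : Int × Int) : Bool :=
  (decide (-1 ≤ p.1 - q.1) && decide (p.1 - q.1 ≤ 1) && (p.2 == q.2)) ||
  ((p.1 == q.1) && decide (-1 ≤ p.2 - q.2) && decide (p.2 - q.2 ≤ 1))

-- adjoins(pts, pt)
def pvAdjoins (pts : List (Int × Int)) (pt : Int × Int) : Bool :=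
  pts.any (fun p => pvAdj p pt)

-- the datapts list comprehension (Point(x, y) becomes the pair (x, y))
def pvDatapts (data : List (List Int)) (critvar : Int) : List (Int × Int) :=
  (PySem.List.enumerate data 0).flatMap (fun yrow =>
    (PySem.List.enumerate yrow.2 0).filterMap (fun xv =>
      if xv.2 ≤ critvar then some (xv.1, yrow.1) else none))

-- the body of A's 'for dp in datapts' loop; regions are Python sets of points,
-- kept as PySem.Set lists in first-insertion order.  Python compares the region
-- SETS ('r == adjregs[0]', 'r not in adjregs'); during A's run all live regions
-- are pairwise disjoint and non-empty, so list equality decides the same thing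
-- (this disjointness is proved below as part of the simulation invariant).
def pvStepA (regions : List (List (Int × Int))) (dp : Int × Int) : List (List (Int × Int)) :=
  match regions.filter (fun r => pvAdjoins r dp) with
  | [] => regions ++ [[dp]]                                  -- start a new region
  | r0 :: rest =>
      let r0' := PySem.Set.add r0 dp                         -- adjregs[0].add(dp), in place
      let regions' := regions.map (fun r => if r = r0 then r0' else r)
      if rest = [] then regions'
      else (regions'.filter (fun r => decide (r ∉ r0' :: rest))) ++
           [rest.foldl (fun acc s => PySem.Set.union acc s) r0']   -- reduce(set.union, adjregs)

def locate_regions (datastring : List (List Int)) (critvar : Int) : List (List (Int × Int)) :=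
  (pvDatapts datastring critvar).foldl pvStepA []

-- ===== PORT B =====
-- one step of B's inner loop; state = (regions dict, owner dict, next id).
-- regions[i].add(dp) / regions.pop(lo) never miss in B (owner only holds live
-- ids), so Dict.modify with default [] / Dict.getD + Dict.erase are exact here.
def pvStepB (st : PySem.Dict Int (List (Int × Int)) × PySem.Dict (Int × Int) Int × Int)
    (dp : Int × Int) : PySem.Dict Int (List (Int × Int)) × PySem.Dict (Int × Int) Int × Int :=
  match st with
  | (regions, owner, nid) =>
    match owner.get? (dp.1 - 1, dp.2), owner.get? (dp.1, dp.2 - 1) with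
    | none, none => (regions.insert nid [dp], owner.insert dp nid, nid + 1)
    | some a, none => (regions.modify a [] (fun r => PySem.Set.add r dp), owner.insert dp a, nid)
    | none, some b => (regions.modify b [] (fun r => PySem.Set.add r dp), owner.insert dp b, nid)
    | some a, some b =>
      if a = b then (regions.modify a [] (fun r => PySem.Set.add r dp), owner.insert dp a, nid)
      else
        let lo := if a < b then a else b
        let hi := if a < b then b else a
        let merged := PySem.Set.union (PySem.Set.union (regions.getD lo []) [dp]) (regions.getD hi [])
        (((regions.erase lo).erase hi).insert nid merged,
         merged.foldl (fun o p => o.insert p nid) owner,   -- 'for p in merged: owner[p] = nid' — owner is only looked up, never iterated, so set order is immaterial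
         nid + 1)

def locate_regions_alt (datastring : List (List Int)) (critvar : Int) : List (List (Int × Int)) :=
  ((PySem.List.enumerate datastring 0).foldl (fun st yrow =>
      (PySem.List.enumerate yrow.2 0).foldl (fun st xv =>
        if xv.2 ≤ critvar then pvStepB st (xv.1, yrow.1) else st) st)
    (PySem.Dict.mk [], PySem.Dict.mk [], 0)).1.values

-- ===== PRECONDITION & SPEC =====
def Spec_locate_regions (datastring : List (List Int)) (critvar : Int) (out : List (List (Int × Int))) : Prop := out = locate_regions_alt datastring critvar
instance (datastring : List (List Int)) (critvar : Int) (out : List (List (Int × Int))) : Decidable (Spec_locate_regions datastring critvar out) := by unfold Spec_locate_regions; infer_instance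

-- ===== CLAIM (what is proved, stated in full; the proofs are below) =====
def Claim_equal_locate_regions : Prop := ∀ (datastring : List (List Int)) (critvar : Int), Dom_locate_regions datastring critvar → Spec_locate_regions datastring critvar (locate_regions datastring critvar)

-- ===== LEMMAS AND PROOFS =====

-- row-major order on grid points
def pvBefore (p q : Int × Int) : Prop := p.2 < q.2 ∨ (p.2 = q.2 ∧ p.1 < q.1)

-- the simulation invariant between A's region list and B's state
def pvInv (d : PySem.Dict Int (List (Int × Int))) (ow : PySem.Dict (Int × Int) Int)
    (nid : Int) (rest : List (Int × Int)) : Prop :=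
  (d.items.map (·.1)).Pairwise (· < ·) ∧
  (∀ i r, d.get? i = some r → i < nid) ∧
  (∀ p i, ow.get? p = some i → ∃ r, d.get? i = some r ∧ p ∈ r) ∧
  (∀ i r, d.get? i = some r → ∀ p ∈ r, ow.get? p = some i) ∧
  (∀ i r, d.get? i = some r → r ≠ []) ∧
  (∀ i r, d.get? i = some r → ∀ p ∈ r, ∀ q ∈ rest, pvBefore p q)

lemma pv_before_irrefl (p : Int × Int) : ¬ pvBefore p p := by
  simp [pvBefore]

lemma pv_filter_eq_singleton {α : Type} {R : α → α → Prop} {l : List α} {p : α → Bool} {x : α}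
    (hirr : ∀ z, ¬ R z z) (hpw : l.Pairwise R) (hx : x ∈ l) (hpx : p x = true)
    (huni : ∀ z ∈ l, p z = true → z = x) : l.filter p = [x] := by
  induction l with
  | nil => cases hx
  | cons a t ih =>
      rw [List.pairwise_cons] at hpw
      by_cases hpa : p a = true
      · have hax : a = x := huni a (List.mem_cons_self ..) hpa
        subst hax
        have ht : t.filter p = [] := by
          rw [List.filter_eq_nil_iff]
          intro z hz hpz
          have hzx := huni z (List.mem_cons_of_mem _ hz) hpz
          subst hzx
          exact hirr z (hpw.1 z hz)
        simp [hpa, ht]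
      · have hxt : x ∈ t := by
          rcases List.mem_cons.mp hx with h | h
          · exact absurd (h ▸ hpx) hpa
          · exact h
        rw [List.filter_cons_of_neg (by simpa using hpa)]
        exact ih hpw.2 hxt (fun z hz => huni z (List.mem_cons_of_mem _ hz))

lemma pv_filter_eq_pair {α : Type} {R : α → α → Prop} {l : List α} {p : α → Bool} {x y : α}
    (hirr : ∀ z, ¬ R z z) (hasym : ∀ u v, R u v → R v u → False)
    (hpw : l.Pairwise R) (hx : x ∈ l) (hy : y ∈ l)
    (hpx : p x = true) (hpy : p y = true) (hxy : R x y)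
    (huni : ∀ z ∈ l, p z = true → z = x ∨ z = y) : l.filter p = [x, y] := by
  induction l with
  | nil => cases hx
  | cons a t ih =>
      rw [List.pairwise_cons] at hpw
      have hxyne : x ≠ y := fun h => hirr x (h ▸ hxy)
      by_cases hpa : p a = true
      · rcases huni a (List.mem_cons_self ..) hpa with ha | ha
        · subst ha
          have hyt : y ∈ t := by
            rcases List.mem_cons.mp hy with h | h
            · exact absurd h.symm hxyne
            · exact h
          have ht : t.filter p = [y] := by
            refine pv_filter_eq_singleton hirr hpw.2 hyt hpy ?_
            intro z hz hpz
            rcases huni z (List.mem_cons_of_mem _ hz) hpz with h | h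
            · exact absurd (hpw.1 z hz) (h ▸ hirr a)
            · exact h
          simp [hpa, ht]
        · subst ha
          have hxt : x ∈ t := by
            rcases List.mem_cons.mp hx with h | h
            · exact absurd h.symm (Ne.symm hxyne)
            · exact h
          exact absurd (hpw.1 x hxt) (fun h => hasym x a hxy h)
      · have hxt : x ∈ t := by
          rcases List.mem_cons.mp hx with h | h
          · exact absurd (h ▸ hpx) hpa
          · exact h
        have hyt : y ∈ t := by
          rcases List.mem_cons.mp hy with h | h
          · exact absurd (h ▸ hpy) hpa
          · exact h
        rw [List.filter_cons_of_neg (by simpa using hpa)]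
        exact ih hpw.2 hxt hyt (fun z hz => huni z (List.mem_cons_of_mem _ hz))

lemma pv_find?_filter_ne {κ ν : Type} [BEq κ] [LawfulBEq κ] [DecidableEq κ]
    (l : List (κ × ν)) (k k' : κ) :
    (l.filter (fun p => !(p.1 == k))).find? (fun p => p.1 == k') =
      if k' = k then none else l.find? (fun p => p.1 == k') := by
  by_cases h2 : k' = k
  · rw [if_pos h2, List.find?_eq_none]
    intro p hp
    have hpk := (List.mem_filter.mp hp).2
    simp only [Bool.not_eq_eq_eq_not, Bool.not_true, beq_eq_false_iff_ne, ne_eq] at hpk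
    simp only [beq_iff_eq]
    rw [h2]
    exact hpk
  · rw [if_neg h2]
    induction l with
    | nil => simp
    | cons hd tl ih =>
        by_cases h1 : hd.1 = k
        · rw [List.filter_cons_of_neg (by simp [h1]),
              List.find?_cons_of_neg (p := fun p => p.1 == k') (a := hd)
                (by simp only [beq_iff_eq]; exact fun h => h2 (by rw [← h, h1]))]
          exact ih
        · by_cases h3 : hd.1 = k'
          · rw [List.filter_cons_of_pos (by simp [h1]),
                List.find?_cons_of_pos (p := fun p => p.1 == k') (a := hd) (by simp [h3]),
                List.find?_cons_of_pos (p := fun p => p.1 == k') (a := hd) (by simp [h3])]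
          · rw [List.filter_cons_of_pos (by simp [h1]),
                List.find?_cons_of_neg (p := fun p => p.1 == k') (a := hd) (by simp [h3]),
                List.find?_cons_of_neg (p := fun p => p.1 == k') (a := hd) (by simp [h3])]
            exact ih

lemma pv_get?_erase {κ ν : Type} [BEq κ] [LawfulBEq κ] [DecidableEq κ]
    (d : PySem.Dict κ ν) (k k' : κ) :
    (d.erase k).get? k' = if k' = k then none else d.get? k' := by
  show Option.map _ ((d.items.filter (fun p => !(p.1 == k))).find? (fun p => p.1 == k')) = _
  rw [pv_find?_filter_ne]
  by_cases h : k' = k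
  · simp [h]
  · simp only [if_neg h]
    rfl

lemma pv_get?_foldl_insert {κ ν : Type} [BEq κ] [LawfulBEq κ] [DecidableEq κ]
    (l : List κ) (ow : PySem.Dict κ ν) (v : ν) (q : κ) :
    (l.foldl (fun o p => o.insert p v) ow).get? q = if q ∈ l then some v else ow.get? q := by
  induction l generalizing ow with
  | nil => simp
  | cons a t ih =>
      simp only [List.foldl_cons, ih, List.mem_cons]
      by_cases hq : q ∈ t
      · simp [hq]
      · simp only [hq, or_false, PySem.Dict.get?_insert]
        by_cases hqa : q = a <;> simp [hqa]

lemma pv_adjoins_iff (r : List (Int × Int)) (dp : Int × Int)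
    (hb : ∀ p ∈ r, pvBefore p dp) :
    pvAdjoins r dp = true ↔ ((dp.1 - 1, dp.2) ∈ r ∨ (dp.1, dp.2 - 1) ∈ r) := by
  simp only [pvAdjoins, List.any_eq_true]
  obtain ⟨dx, dy⟩ := dp
  constructor
  · rintro ⟨⟨px, py⟩, hp, hadj⟩
    simp only [pvAdj, Bool.or_eq_true, Bool.and_eq_true, decide_eq_true_eq, beq_iff_eq] at hadj
    have hbp : py < dy ∨ (py = dy ∧ px < dx) := hb _ hp
    rcases hadj with ⟨⟨h1, h2⟩, h3⟩ | ⟨⟨h1, h2⟩, h3⟩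
    · left
      have hx : px = dx - 1 := by rcases hbp with h | ⟨h4, h5⟩ <;> omega
      have hy : py = dy := h3
      rw [hx, hy] at hp
      exact hp
    · right
      have hy : py = dy - 1 := by rcases hbp with h | ⟨h4, h5⟩ <;> omega
      have hx : px = dx := h1
      rw [hx, hy] at hp
      exact hp
  · rintro (h | h)
    · refine ⟨_, h, ?_⟩
      simp [pvAdj]
    · refine ⟨_, h, ?_⟩
      simp [pvAdj]

lemma pv_union_singleton (s : List (Int × Int)) (x : Int × Int) :
    PySem.Set.union s [x] = PySem.Set.add s x := rfl

lemma pv_inv_facts (d : PySem.Dict Int (List (Int × Int))) (ow : PySem.Dict (Int × Int) Int)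
    (nid : Int) (dp : Int × Int) (rest : List (Int × Int))
    (hinv : pvInv d ow nid (dp :: rest)) :
    (∀ z ∈ d.items, d.get? z.1 = some z.2) ∧
    (∀ i r, d.get? i = some r → ∀ p ∈ r, pvBefore p dp) ∧
    (∀ i r, d.get? i = some r → dp ∉ r) ∧
    ow.get? dp = none ∧
    (∀ i j r s, d.get? i = some r → d.get? j = some s → r = s → i = j) := by
  obtain ⟨h1, h2, h3, h4, h5, h6⟩ := hinv
  have hnd : d.keys.Nodup := List.Pairwise.imp (fun h => ne_of_lt h) h1
  have hmem : ∀ z ∈ d.items, d.get? z.1 = some z.2 := by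
    intro z hz
    exact PySem.Dict.get?_of_mem_items d (show (z.1, z.2) ∈ d.items from hz) hnd
  have hbdp : ∀ i r, d.get? i = some r → ∀ p ∈ r, pvBefore p dp := by
    intro i r hg p hp
    exact h6 i r hg p hp dp (List.mem_cons_self ..)
  have hdpnot : ∀ i r, d.get? i = some r → dp ∉ r := by
    intro i r hg hdp
    exact pv_before_irrefl dp (hbdp i r hg dp hdp)
  have howdp : ow.get? dp = none := by
    cases hgd : ow.get? dp with
    | none => rfl
    | some i =>
        obtain ⟨r, hr, hdr⟩ := h3 dp i hgd
        exact absurd (hbdp i r hr dp hdr) (pv_before_irrefl dp)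
  have hvalinj : ∀ i j r s, d.get? i = some r → d.get? j = some s → r = s → i = j := by
    intro i j r s hgi hgj hrs
    obtain ⟨p, hp⟩ := List.exists_mem_of_ne_nil r (h5 i r hgi)
    have hpi := h4 i r hgi p hp
    have hpj := h4 j s hgj p (hrs ▸ hp)
    rw [hpi] at hpj
    exact Option.some.inj hpj
  exact ⟨hmem, hbdp, hdpnot, howdp, hvalinj⟩

lemma pv_values_filter (d : PySem.Dict Int (List (Int × Int))) (p : List (Int × Int) → Bool) :
    d.values.filter p = (d.items.filter (fun z => p z.2)).map (·.2) := by
  show (d.items.map (·.2)).filter p = _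
  rw [List.filter_map]
  rfl

-- case: no adjoining region
lemma pv_step_none (d : PySem.Dict Int (List (Int × Int))) (ow : PySem.Dict (Int × Int) Int)
    (nid : Int) (dp : Int × Int) (rest : List (Int × Int))
    (hinv : pvInv d ow nid (dp :: rest)) (hdpr : ∀ q ∈ rest, pvBefore dp q)
    (hL : ow.get? (dp.1 - 1, dp.2) = none) (hU : ow.get? (dp.1, dp.2 - 1) = none) :
    pvStepA d.values dp = (d.insert nid [dp]).values ∧
    pvInv (d.insert nid [dp]) (ow.insert dp nid) (nid + 1) rest := by
  obtain ⟨h1, h2, h3, h4, h5, h6⟩ := hinv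
  obtain ⟨hmem, hbdp, hdpnot, howdp, hvalinj⟩ := pv_inv_facts d ow nid dp rest ⟨h1, h2, h3, h4, h5, h6⟩
  have hnone : ∀ z ∈ d.items, ¬ (pvAdjoins z.2 dp = true) := by
    intro z hz hadj
    have hg := hmem z hz
    rcases (pv_adjoins_iff z.2 dp (hbdp _ _ hg)).mp hadj with hm | hm
    · have := h4 _ _ hg _ hm
      rw [hL] at this
      cases this
    · have := h4 _ _ hg _ hm
      rw [hU] at this
      cases this
  have hfe : d.values.filter (fun r => pvAdjoins r dp) = [] := by
    rw [pv_values_filter]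
    rw [List.filter_eq_nil_iff.mpr (fun z hz => hnone z hz)]
    rfl
  have hcont : d.contains nid = false := by
    rw [PySem.Dict.contains_eq_isSome_get?]
    cases hgn : d.get? nid with
    | none => rfl
    | some r => exact absurd (h2 _ _ hgn) (lt_irrefl nid)
  have hitems : (d.insert nid [dp]).items = d.items ++ [(nid, [dp])] :=
    PySem.Dict.items_insert_of_not_contains _ _ hcont
  have hgi : ∀ j, (d.insert nid [dp]).get? j = if j = nid then some [dp] else d.get? j :=
    fun j => PySem.Dict.get?_insert _ _ _ _
  have hog : ∀ q, (ow.insert dp nid).get? q = if q = dp then some nid else ow.get? q :=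
    fun q => PySem.Dict.get?_insert _ _ _ _
  constructor
  · unfold pvStepA
    rw [hfe]
    show d.values ++ [[dp]] = _
    show _ = (d.insert nid [dp]).items.map (·.2)
    rw [hitems, List.map_append]
    rfl
  · refine ⟨?_, ?_, ?_, ?_, ?_, ?_⟩
    · rw [hitems, List.map_append]
      rw [List.pairwise_append]
      refine ⟨h1, by simp, ?_⟩
      intro a ha b hb
      simp only [List.map_cons, List.map_nil, List.mem_singleton] at hb
      subst hb
      rcases List.mem_map.mp ha with ⟨z, hz, hza⟩
      have := h2 _ _ (hmem z hz)
      omega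
    · intro j r hg
      rw [hgi] at hg
      split at hg
      · omega
      · have := h2 _ _ hg; omega
    · intro p j hg
      rw [hog] at hg
      split at hg
      · rename_i hpd
        cases hg
        refine ⟨[dp], by rw [hgi, if_pos rfl], ?_⟩
        rw [hpd]
        exact List.mem_singleton_self _
      · obtain ⟨r, hr, hpr⟩ := h3 _ _ hg
        refine ⟨r, ?_, hpr⟩
        rw [hgi]
        split
        · rename_i hjn
          rw [hjn] at hr
          exact absurd (h2 _ _ hr) (lt_irrefl _)
        · exact hr
    · intro j r hg p hp
      rw [hgi] at hg
      rw [hog]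
      split at hg
      · rename_i hjn
        cases hg
        have hpd := List.mem_singleton.mp hp
        rw [if_pos hpd, hjn]
      · split
        · rename_i hpd
          rw [hpd] at hp
          exact absurd hp (hdpnot _ _ hg)
        · exact h4 _ _ hg _ hp
    · intro j r hg
      rw [hgi] at hg
      split at hg
      · cases hg; simp
      · exact h5 _ _ hg
    · intro j r hg p hp q hq
      rw [hgi] at hg
      split at hg
      · cases hg
        rcases List.mem_singleton.mp hp with rfl
        exact hdpr q hq
      · exact h6 _ _ hg _ hp q (List.mem_cons_of_mem _ hq)

-- case: exactly one adjoining region (key i, value rI)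
lemma pv_step_single (d : PySem.Dict Int (List (Int × Int))) (ow : PySem.Dict (Int × Int) Int)
    (nid : Int) (dp : Int × Int) (rest : List (Int × Int)) (i : Int) (rI : List (Int × Int))
    (hinv : pvInv d ow nid (dp :: rest)) (hdpr : ∀ q ∈ rest, pvBefore dp q)
    (hi : d.get? i = some rI) (hadj : pvAdjoins rI dp = true)
    (huniq : ∀ j s, d.get? j = some s → pvAdjoins s dp = true → j = i) :
    pvStepA d.values dp = (d.modify i [] (fun r => PySem.Set.add r dp)).values ∧
    pvInv (d.modify i [] (fun r => PySem.Set.add r dp)) (ow.insert dp i) nid rest := by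
  obtain ⟨h1, h2, h3, h4, h5, h6⟩ := hinv
  obtain ⟨hmem, hbdp, hdpnot, howdp, hvalinj⟩ := pv_inv_facts d ow nid dp rest ⟨h1, h2, h3, h4, h5, h6⟩
  have hnd : d.keys.Nodup := List.Pairwise.imp (fun h => ne_of_lt h) h1
  have hx : (i, rI) ∈ d.items := PySem.Dict.mem_items_of_get?_eq_some d hi
  have hfi : d.items.filter (fun z => pvAdjoins z.2 dp) = [(i, rI)] := by
    refine pv_filter_eq_singleton (R := fun z w : Int × List (Int × Int) => z.1 < w.1)
      (fun z => lt_irrefl z.1) (List.pairwise_map.mp h1) hx hadj ?_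
    intro z hz hpz
    have hg := hmem z hz
    have hji := huniq z.1 z.2 hg hpz
    rw [hji] at hg
    rw [hg] at hi
    have h2i := Option.some.inj hi
    exact Prod.ext hji h2i
  have hfe : d.values.filter (fun r => pvAdjoins r dp) = [rI] := by
    rw [pv_values_filter, hfi]
    rfl
  have hgd : d.getD i [] = rI := PySem.Dict.getD_of_get?_eq_some _ _ hi
  have hci : d.contains i = true := by
    rw [PySem.Dict.contains_eq_isSome_get?, hi]
    rfl
  have hitems : (d.modify i [] (fun r => PySem.Set.add r dp)).items =
      d.items.map (fun z => if z.1 == i then (i, PySem.Set.add rI dp) else z) := by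
    show (d.insert i _).items = _
    rw [hgd]
    exact PySem.Dict.items_insert_of_contains _ _ hci
  have hgi : ∀ j, (d.modify i [] (fun r => PySem.Set.add r dp)).get? j =
      if j = i then some (PySem.Set.add rI dp) else d.get? j := by
    intro j
    show (d.insert i _).get? j = _
    rw [hgd]
    exact PySem.Dict.get?_insert _ _ _ _
  have hog : ∀ q, (ow.insert dp i).get? q = if q = dp then some i else ow.get? q :=
    fun q => PySem.Dict.get?_insert _ _ _ _
  have hval2key : ∀ z ∈ d.items, z.2 = rI → z.1 = i :=
    fun z hz hzr => hvalinj z.1 i z.2 rI (hmem z hz) hi hzr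
  have hkey2val : ∀ z ∈ d.items, z.1 = i → z.2 = rI := by
    intro z hz hzi
    have hg := hmem z hz
    rw [hzi, hi] at hg
    exact (Option.some.inj hg).symm
  constructor
  · unfold pvStepA
    rw [hfe]
    show (d.items.map (·.2)).map _ = (d.modify i [] (fun r => PySem.Set.add r dp)).items.map (·.2)
    rw [hitems, List.map_map, List.map_map]
    refine List.map_congr_left ?_
    intro z hz
    simp only [Function.comp_apply]
    by_cases hzi : z.1 = i
    · rw [if_pos (hkey2val z hz hzi), if_pos (by simp [hzi])]
    · rw [if_neg (fun h => hzi (hval2key z hz h)), if_neg (by simp [hzi])]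
  · have hkeys : (d.modify i [] (fun r => PySem.Set.add r dp)).items.map (·.1) = d.items.map (·.1) := by
      rw [hitems, List.map_map]
      refine List.map_congr_left ?_
      intro z _
      simp only [Function.comp_apply]
      by_cases hzi : z.1 = i
      · rw [if_pos (by simp [hzi])]
        exact hzi.symm
      · rw [if_neg (by simp [hzi])]
    refine ⟨by rw [hkeys]; exact h1, ?_, ?_, ?_, ?_, ?_⟩
    · intro j r hg
      rw [hgi] at hg
      split at hg
      · rename_i hji
        rw [hji]
        exact h2 _ _ hi
      · exact h2 _ _ hg
    · intro p j hg
      rw [hog] at hg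
      split at hg
      · rename_i hpd
        cases hg
        refine ⟨PySem.Set.add rI dp, by rw [hgi, if_pos rfl], ?_⟩
        rw [hpd]
        exact (PySem.Set.mem_add _ _ _).mpr (Or.inr rfl)
      · obtain ⟨r, hr, hpr⟩ := h3 _ _ hg
        by_cases hji : j = i
        · refine ⟨PySem.Set.add rI dp, by rw [hgi, if_pos hji], ?_⟩
          rw [hji] at hr
          rw [hr] at hi
          have := Option.some.inj hi
          exact (PySem.Set.mem_add _ _ _).mpr (Or.inl (this ▸ hpr))
        · exact ⟨r, by rw [hgi, if_neg hji]; exact hr, hpr⟩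
    · intro j r hg p hp
      rw [hgi] at hg
      rw [hog]
      split at hg
      · rename_i hji
        cases hg
        rcases (PySem.Set.mem_add _ _ _).mp hp with hpI | hpd
        · rw [if_neg (fun h : p = dp => hdpnot _ _ hi (by rw [← h]; exact hpI)), hji]
          exact h4 _ _ hi _ hpI
        · rw [if_pos hpd, hji]
      · split
        · rename_i hpd
          rw [hpd] at hp
          exact absurd hp (hdpnot _ _ hg)
        · exact h4 _ _ hg _ hp
    · intro j r hg
      rw [hgi] at hg
      split at hg
      · cases hg
        exact List.ne_nil_of_mem ((PySem.Set.mem_add _ _ _).mpr (Or.inr rfl))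
      · exact h5 _ _ hg
    · intro j r hg p hp q hq
      rw [hgi] at hg
      split at hg
      · cases hg
        rcases (PySem.Set.mem_add _ _ _).mp hp with hpI | hpd
        · exact h6 _ _ hi _ hpI q (List.mem_cons_of_mem _ hq)
        · rw [hpd]
          exact hdpr q hq
      · exact h6 _ _ hg _ hp q (List.mem_cons_of_mem _ hq)

-- case: two distinct adjoining regions (keys lo < hi), merged into a fresh one
lemma pv_step_merge (d : PySem.Dict Int (List (Int × Int))) (ow : PySem.Dict (Int × Int) Int)
    (nid : Int) (dp : Int × Int) (rest : List (Int × Int)) (lo hi : Int)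
    (rLo rHi : List (Int × Int))
    (hinv : pvInv d ow nid (dp :: rest)) (hdpr : ∀ q ∈ rest, pvBefore dp q)
    (hlo : d.get? lo = some rLo) (hhi : d.get? hi = some rHi) (hlohi : lo < hi)
    (hadjLo : pvAdjoins rLo dp = true) (hadjHi : pvAdjoins rHi dp = true)
    (huniq : ∀ j s, d.get? j = some s → pvAdjoins s dp = true → j = lo ∨ j = hi) :
    pvStepA d.values dp =
      (((d.erase lo).erase hi).insert nid (PySem.Set.union (PySem.Set.add rLo dp) rHi)).values ∧
    pvInv (((d.erase lo).erase hi).insert nid (PySem.Set.union (PySem.Set.add rLo dp) rHi))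
      ((PySem.Set.union (PySem.Set.add rLo dp) rHi).foldl (fun o p => o.insert p nid) ow)
      (nid + 1) rest := by
  obtain ⟨h1, h2, h3, h4, h5, h6⟩ := hinv
  obtain ⟨hmem, hbdp, hdpnot, howdp, hvalinj⟩ := pv_inv_facts d ow nid dp rest ⟨h1, h2, h3, h4, h5, h6⟩
  set M := PySem.Set.union (PySem.Set.add rLo dp) rHi with hM
  have hlonehi : lo ≠ hi := ne_of_lt hlohi
  have hkey2val : ∀ z ∈ d.items, ∀ k r, d.get? k = some r → z.1 = k → z.2 = r := by
    intro z hz k r hk hzk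
    have hg := hmem z hz
    rw [hzk, hk] at hg
    exact (Option.some.inj hg).symm
  have hval2lo : ∀ z ∈ d.items, z.2 = rLo → z.1 = lo :=
    fun z hz hzr => hvalinj z.1 lo z.2 rLo (hmem z hz) hlo hzr
  have hval2hi : ∀ z ∈ d.items, z.2 = rHi → z.1 = hi :=
    fun z hz hzr => hvalinj z.1 hi z.2 rHi (hmem z hz) hhi hzr
  have hmM : ∀ p, p ∈ M ↔ p ∈ rLo ∨ p = dp ∨ p ∈ rHi := by
    intro p
    rw [hM]
    rw [PySem.Set.mem_union _ _ _, PySem.Set.mem_add _ _ _]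
    tauto
  have hdpM : dp ∈ M := (hmM dp).mpr (Or.inr (Or.inl rfl))
  have hfi : d.items.filter (fun z => pvAdjoins z.2 dp) = [(lo, rLo), (hi, rHi)] := by
    refine pv_filter_eq_pair (R := fun z w : Int × List (Int × Int) => z.1 < w.1)
      (fun z => lt_irrefl z.1) (fun u v h1 h2 => absurd h1 (lt_asymm h2))
      (List.pairwise_map.mp h1)
      (PySem.Dict.mem_items_of_get?_eq_some d hlo)
      (PySem.Dict.mem_items_of_get?_eq_some d hhi)
      hadjLo hadjHi hlohi ?_
    intro z hz hpz
    rcases huniq z.1 z.2 (hmem z hz) hpz with hzk | hzk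
    · exact Or.inl (Prod.ext hzk (hkey2val z hz lo rLo hlo hzk))
    · exact Or.inr (Prod.ext hzk (hkey2val z hz hi rHi hhi hzk))
  have hfe : d.values.filter (fun r => pvAdjoins r dp) = [rLo, rHi] := by
    rw [pv_values_filter, hfi]
    rfl
  have hge : ∀ j, ((d.erase lo).erase hi).get? j =
      if j = hi then none else if j = lo then none else d.get? j := by
    intro j
    rw [pv_get?_erase, pv_get?_erase]
  have hcont2 : ((d.erase lo).erase hi).contains nid = false := by
    rw [PySem.Dict.contains_eq_isSome_get?, hge]
    rw [if_neg (ne_of_gt (h2 _ _ hhi)), if_neg (ne_of_gt (h2 _ _ hlo))]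
    cases hgn : d.get? nid with
    | none => rfl
    | some r => exact absurd (h2 _ _ hgn) (lt_irrefl nid)
  have herit : ((d.erase lo).erase hi).items =
      d.items.filter (fun z => !(z.1 == hi) && !(z.1 == lo)) := by
    show ((d.erase lo).items.filter _) = _
    show (((d.items.filter _)).filter _) = _
    rw [List.filter_filter]
  have hitems2 : (((d.erase lo).erase hi).insert nid M).items =
      d.items.filter (fun z => !(z.1 == hi) && !(z.1 == lo)) ++ [(nid, M)] := by
    rw [PySem.Dict.items_insert_of_not_contains _ _ hcont2, herit]
  have hgm : ∀ j, (((d.erase lo).erase hi).insert nid M).get? j =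
      if j = nid then some M else if j = hi then none else if j = lo then none else d.get? j := by
    intro j
    rw [PySem.Dict.get?_insert, hge]
  have how' : ∀ q, (M.foldl (fun o p => o.insert p nid) ow).get? q =
      if q ∈ M then some nid else ow.get? q :=
    fun q => pv_get?_foldl_insert M ow nid q
  constructor
  · unfold pvStepA
    rw [hfe]
    show (d.values.map (fun r => if r = rLo then PySem.Set.add rLo dp else r)).filter
        (fun r => decide (r ∉ PySem.Set.add rLo dp :: [rHi])) ++
        [[rHi].foldl (fun acc s => PySem.Set.union acc s) (PySem.Set.add rLo dp)] = _
    rw [List.foldl_cons, List.foldl_nil]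
    have e1 : d.values.map (fun r => if r = rLo then PySem.Set.add rLo dp else r) =
        d.items.map (fun z => if z.2 = rLo then PySem.Set.add rLo dp else z.2) := by
      show (d.items.map (·.2)).map _ = _
      rw [List.map_map]
      rfl
    rw [e1, List.filter_map]
    have e2 : d.items.filter
        ((fun r => decide (r ∉ PySem.Set.add rLo dp :: [rHi])) ∘
          (fun z => if z.2 = rLo then PySem.Set.add rLo dp else z.2)) =
        d.items.filter (fun z => !(z.1 == hi) && !(z.1 == lo)) := by
      refine List.filter_congr ?_
      intro z hz
      simp only [Function.comp_apply, List.mem_cons, not_or]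
      by_cases hzlo : z.1 = lo
      · have hzr : z.2 = rLo := hkey2val z hz lo rLo hlo hzlo
        rw [if_pos hzr]
        simp [hzlo]
      · have hzr : ¬ z.2 = rLo := fun h => hzlo (hval2lo z hz h)
        rw [if_neg hzr]
        by_cases hzhi : z.1 = hi
        · have hzr2 : z.2 = rHi := hkey2val z hz hi rHi hhi hzhi
          simp [hzhi, hzr2]
        · have hzr2 : ¬ z.2 = rHi := fun h => hzhi (hval2hi z hz h)
          have hne1 : ¬ z.2 = PySem.Set.add rLo dp := by
            intro h
            have : dp ∈ z.2 := by
              rw [h]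
              exact (PySem.Set.mem_add _ _ _).mpr (Or.inr rfl)
            exact hdpnot _ _ (hmem z hz) this
          simp [hzhi, hzlo, hne1, hzr2]
    rw [e2]
    show _ = (((d.erase lo).erase hi).insert nid M).items.map (·.2)
    rw [hitems2, List.map_append]
    refine congrArg (· ++ [M]) ?_
    refine List.map_congr_left ?_
    intro z hz
    have hzlo : ¬ z.1 = lo := by
      have := (List.mem_filter.mp hz).2
      simp only [Bool.and_eq_true, Bool.not_eq_eq_eq_not, Bool.not_true, beq_eq_false_iff_ne,
        ne_eq] at this
      exact this.2
    have hzmem := (List.mem_filter.mp hz).1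
    exact if_neg (fun h => hzlo (hval2lo z hzmem h))
  · refine ⟨?_, ?_, ?_, ?_, ?_, ?_⟩
    · rw [hitems2, List.map_append, List.pairwise_append]
      refine ⟨?_, by simp, ?_⟩
      · exact List.Pairwise.sublist (List.Sublist.map _ List.filter_sublist) h1
      · intro a ha b hb
        simp only [List.map_cons, List.map_nil, List.mem_singleton] at hb
        subst hb
        rcases List.mem_map.mp ha with ⟨z, hz, hza⟩
        have hzmem := (List.mem_filter.mp hz).1
        have := h2 _ _ (hmem z hzmem)
        omega
    · intro j r hg
      rw [hgm] at hg
      split at hg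
      · omega
      · split at hg
        · cases hg
        · split at hg
          · cases hg
          · have := h2 _ _ hg; omega
    · intro q j hg
      rw [how'] at hg
      split at hg
      · rename_i hqM
        cases hg
        exact ⟨M, by rw [hgm, if_pos rfl], hqM⟩
      · rename_i hqM
        obtain ⟨r, hr, hqr⟩ := h3 _ _ hg
        have hjlo : j ≠ lo := by
          intro h
          rw [h, hlo] at hr
          cases hr
          exact hqM ((hmM q).mpr (Or.inl hqr))
        have hjhi : j ≠ hi := by
          intro h
          rw [h, hhi] at hr
          cases hr
          exact hqM ((hmM q).mpr (Or.inr (Or.inr hqr)))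
        have hjn : j ≠ nid := ne_of_lt (h2 _ _ hr)
        exact ⟨r, by rw [hgm, if_neg hjn, if_neg hjhi, if_neg hjlo]; exact hr, hqr⟩
    · intro j r hg p hp
      rw [hgm] at hg
      rw [how']
      split at hg
      · rename_i hjn
        cases hg
        rw [if_pos hp, hjn]
      · split at hg
        · cases hg
        · split at hg
          · cases hg
          · rename_i hjn hjhi hjlo
            split
            · rename_i hpM
              exfalso
              rcases (hmM p).mp hpM with hpl | hpd | hph
              · have e1 := h4 _ _ hlo _ hpl
                have e2 := h4 _ _ hg _ hp
                rw [e1] at e2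
                exact hjlo (Option.some.inj e2).symm
              · rw [hpd] at hp
                exact hdpnot _ _ hg hp
              · have e1 := h4 _ _ hhi _ hph
                have e2 := h4 _ _ hg _ hp
                rw [e1] at e2
                exact hjhi (Option.some.inj e2).symm
            · exact h4 _ _ hg _ hp
    · intro j r hg
      rw [hgm] at hg
      split at hg
      · cases hg
        exact List.ne_nil_of_mem hdpM
      · split at hg
        · cases hg
        · split at hg
          · cases hg
          · exact h5 _ _ hg
    · intro j r hg p hp q hq
      rw [hgm] at hg
      split at hg
      · cases hg
        rcases (hmM p).mp hp with hpl | hpd | hph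
        · exact h6 _ _ hlo _ hpl q (List.mem_cons_of_mem _ hq)
        · rw [hpd]
          exact hdpr q hq
        · exact h6 _ _ hhi _ hph q (List.mem_cons_of_mem _ hq)
      · split at hg
        · cases hg
        · split at hg
          · cases hg
          · exact h6 _ _ hg _ hp q (List.mem_cons_of_mem _ hq)

theorem pv_step_sim (d : PySem.Dict Int (List (Int × Int))) (ow : PySem.Dict (Int × Int) Int)
    (nid : Int) (dp : Int × Int) (rest : List (Int × Int))
    (hinv : pvInv d ow nid (dp :: rest)) (hdpr : ∀ q ∈ rest, pvBefore dp q) :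
    pvStepA d.values dp = (pvStepB (d, ow, nid) dp).1.values ∧
    pvInv (pvStepB (d, ow, nid) dp).1 (pvStepB (d, ow, nid) dp).2.1 (pvStepB (d, ow, nid) dp).2.2 rest := by
  obtain ⟨h1, h2, h3, h4, h5, h6⟩ := hinv
  obtain ⟨hmem, hbdp, hdpnot, howdp, hvalinj⟩ := pv_inv_facts d ow nid dp rest ⟨h1, h2, h3, h4, h5, h6⟩
  cases hL : ow.get? (dp.1 - 1, dp.2) with
  | none =>
    cases hU : ow.get? (dp.1, dp.2 - 1) with
    | none =>
        have hres := pv_step_none d ow nid dp rest ⟨h1, h2, h3, h4, h5, h6⟩ hdpr hL hU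
        simpa only [pvStepB, hL, hU] using hres
    | some b =>
        obtain ⟨rB, hgb, hUb⟩ := h3 _ _ hU
        have hadj : pvAdjoins rB dp = true :=
          (pv_adjoins_iff _ _ (hbdp _ _ hgb)).mpr (Or.inr hUb)
        have huniq : ∀ j s, d.get? j = some s → pvAdjoins s dp = true → j = b := by
          intro j s hg hs
          rcases (pv_adjoins_iff _ _ (hbdp _ _ hg)).mp hs with hm | hm
          · have hj := h4 _ _ hg _ hm
            rw [hL] at hj
            cases hj
          · have hj := h4 _ _ hg _ hm
            rw [hU] at hj
            exact (Option.some.inj hj).symm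
        have hres := pv_step_single d ow nid dp rest b rB ⟨h1, h2, h3, h4, h5, h6⟩ hdpr hgb hadj huniq
        simpa only [pvStepB, hL, hU] using hres
  | some a =>
    obtain ⟨rA, hga, hLa⟩ := h3 _ _ hL
    cases hU : ow.get? (dp.1, dp.2 - 1) with
    | none =>
        have hadj : pvAdjoins rA dp = true :=
          (pv_adjoins_iff _ _ (hbdp _ _ hga)).mpr (Or.inl hLa)
        have huniq : ∀ j s, d.get? j = some s → pvAdjoins s dp = true → j = a := by
          intro j s hg hs
          rcases (pv_adjoins_iff _ _ (hbdp _ _ hg)).mp hs with hm | hm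
          · have hj := h4 _ _ hg _ hm
            rw [hL] at hj
            exact (Option.some.inj hj).symm
          · have hj := h4 _ _ hg _ hm
            rw [hU] at hj
            cases hj
        have hres := pv_step_single d ow nid dp rest a rA ⟨h1, h2, h3, h4, h5, h6⟩ hdpr hga hadj huniq
        simpa only [pvStepB, hL, hU] using hres
    | some b =>
        obtain ⟨rB, hgb, hUb⟩ := h3 _ _ hU
        by_cases hab : a = b
        · subst hab
          have hadj : pvAdjoins rA dp = true :=
            (pv_adjoins_iff _ _ (hbdp _ _ hga)).mpr (Or.inl hLa)
          have huniq : ∀ j s, d.get? j = some s → pvAdjoins s dp = true → j = a := by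
            intro j s hg hs
            rcases (pv_adjoins_iff _ _ (hbdp _ _ hg)).mp hs with hm | hm
            · have hj := h4 _ _ hg _ hm
              rw [hL] at hj
              exact (Option.some.inj hj).symm
            · have hj := h4 _ _ hg _ hm
              rw [hU] at hj
              exact (Option.some.inj hj).symm
          have hres := pv_step_single d ow nid dp rest a rA ⟨h1, h2, h3, h4, h5, h6⟩ hdpr hga hadj huniq
          simp only [pvStepB, hL, hU]
          rw [if_pos trivial]
          exact hres
        · have huniq : ∀ j s, d.get? j = some s → pvAdjoins s dp = true → j = a ∨ j = b := by
            intro j s hg hs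
            rcases (pv_adjoins_iff _ _ (hbdp _ _ hg)).mp hs with hm | hm
            · have hj := h4 _ _ hg _ hm
              rw [hL] at hj
              exact Or.inl (Option.some.inj hj).symm
            · have hj := h4 _ _ hg _ hm
              rw [hU] at hj
              exact Or.inr (Option.some.inj hj).symm
          rcases lt_or_gt_of_ne hab with hlt | hgt
          · have hres := pv_step_merge d ow nid dp rest a b rA rB ⟨h1, h2, h3, h4, h5, h6⟩ hdpr
              hga hgb hlt
              ((pv_adjoins_iff _ _ (hbdp _ _ hga)).mpr (Or.inl hLa))
              ((pv_adjoins_iff _ _ (hbdp _ _ hgb)).mpr (Or.inr hUb))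
              huniq
            simp only [pvStepB, hL, hU, if_neg hab, if_pos hlt]
            rw [PySem.Dict.getD_of_get?_eq_some _ _ hga, PySem.Dict.getD_of_get?_eq_some _ _ hgb,
                pv_union_singleton]
            exact hres
          · have huniq' : ∀ j s, d.get? j = some s → pvAdjoins s dp = true → j = b ∨ j = a :=
              fun j s hg hs => (huniq j s hg hs).symm
            have hres := pv_step_merge d ow nid dp rest b a rB rA ⟨h1, h2, h3, h4, h5, h6⟩ hdpr
              hgb hga hgt
              ((pv_adjoins_iff _ _ (hbdp _ _ hgb)).mpr (Or.inr hUb))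
              ((pv_adjoins_iff _ _ (hbdp _ _ hga)).mpr (Or.inl hLa))
              huniq'
            have hnlt : ¬ a < b := not_lt.mpr (le_of_lt hgt)
            simp only [pvStepB, hL, hU, if_neg hab, if_neg hnlt]
            rw [PySem.Dict.getD_of_get?_eq_some _ _ hgb, PySem.Dict.getD_of_get?_eq_some _ _ hga,
                pv_union_singleton]
            exact hres

theorem pv_sim (dps : List (Int × Int)) (d : PySem.Dict Int (List (Int × Int)))
    (ow : PySem.Dict (Int × Int) Int) (nid : Int)
    (hpw : dps.Pairwise pvBefore) (hinv : pvInv d ow nid dps) :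
    dps.foldl pvStepA d.values = ((dps.foldl pvStepB (d, ow, nid)).1).values := by
  induction dps generalizing d ow nid with
  | nil => rfl
  | cons dp rest ih =>
      rw [List.pairwise_cons] at hpw
      obtain ⟨heq, hinv'⟩ := pv_step_sim d ow nid dp rest hinv hpw.1
      simp only [List.foldl_cons, heq]
      exact ih _ _ _ hpw.2 hinv'

lemma pv_foldl_ext {α σ : Type} (f g : σ → α → σ) (h : ∀ s a, f s a = g s a)
    (l : List α) (i : σ) : l.foldl f i = l.foldl g i := by
  have hfg : f = g := funext fun s => funext fun a => h s a
  rw [hfg]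

lemma pv_foldl_filterMap {α β σ : Type} (f : α → Option β) (g : σ → β → σ)
    (l : List α) (init : σ) :
    (l.filterMap f).foldl g init =
      l.foldl (fun st a => match f a with | some b => g st b | none => st) init := by
  induction l generalizing init with
  | nil => rfl
  | cons a t ih => cases hfa : f a <;> simp [hfa, ih]

lemma pv_foldl_flatMap {α β σ : Type} (f : α → List β) (g : σ → β → σ)
    (l : List α) (init : σ) :
    (l.flatMap f).foldl g init = l.foldl (fun st a => (f a).foldl g st) init := by
  induction l generalizing init with
  | nil => rfl
  | cons a t ih => simp [List.flatMap_cons, List.foldl_append, ih]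

theorem pv_datapts_pairwise (data : List (List Int)) (critvar : Int) :
    (pvDatapts data critvar).Pairwise pvBefore := by
  unfold pvDatapts
  rw [List.pairwise_flatMap]
  constructor
  · intro yrow _hm
    rw [List.pairwise_filterMap]
    refine List.Pairwise.imp ?_ (PySem.List.pairwise_lt_enumerate _ _)
    intro a a' hlt b hb b' hb'
    by_cases h : a.2 ≤ critvar
    · by_cases h' : a'.2 ≤ critvar
      · simp only [h, if_pos] at hb
        simp only [h', if_pos] at hb'
        cases hb; cases hb'
        exact Or.inr ⟨rfl, hlt⟩
      · simp [h'] at hb'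
    · simp [h] at hb
  · refine List.Pairwise.imp ?_ (PySem.List.pairwise_lt_enumerate _ _)
    intro a a' hlt x hx y hy
    have hx2 : x.2 = a.1 := by
      rcases List.mem_filterMap.mp hx with ⟨b, _, hb⟩
      by_cases h : b.2 ≤ critvar
      · simp only [h, if_pos] at hb; cases hb; rfl
      · simp [h] at hb
    have hy2 : y.2 = a'.1 := by
      rcases List.mem_filterMap.mp hy with ⟨b, _, hb⟩
      by_cases h : b.2 ≤ critvar
      · simp only [h, if_pos] at hb; cases hb; rfl
      · simp [h] at hb
    exact Or.inl (by rw [hx2, hy2]; exact hlt)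

theorem pv_alt_eq_foldl (datastring : List (List Int)) (critvar : Int) :
    locate_regions_alt datastring critvar =
      ((pvDatapts datastring critvar).foldl pvStepB (PySem.Dict.mk [], PySem.Dict.mk [], 0)).1.values := by
  unfold locate_regions_alt pvDatapts
  rw [pv_foldl_flatMap]
  refine congrArg (fun st : PySem.Dict Int (List (Int × Int)) × PySem.Dict (Int × Int) Int × Int => st.1.values)
    (pv_foldl_ext _ _ ?_ _ _)
  intro st yrow
  rw [pv_foldl_filterMap]
  refine pv_foldl_ext _ _ ?_ _ _
  intro s xv
  by_cases h : xv.2 ≤ critvar <;> simp [h]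

-- ===== VERDICT (by name: the statement is the Claim_ definition above) =====
theorem locate_regions_spec : Claim_equal_locate_regions := by
  intro datastring critvar _
  show _ = _
  rw [pv_alt_eq_foldl]
  have h0 : pvInv (PySem.Dict.mk []) (PySem.Dict.mk []) 0 (pvDatapts datastring critvar) := by
    refine ⟨by simp, ?_, ?_, ?_, ?_, ?_⟩ <;>
      intro i r h <;> simp [PySem.Dict.get?] at h
  exact pv_sim _ _ _ _ (pv_datapts_pairwise datastring critvar) h0
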